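-- pv_equiv track=rewrite | github.com/shekharuprety310-ux/action-builder-app | build_dotx_dataset.py | extract_template_defaults
-- ===== SOURCE A (Python) =====
-- def extract_template_defaults(rows):
--     ex_start = None
--     for i, t in enumerate(rows):
--         if t == "Exclusions":
--             ex_start = i
--             break
--     exclusions = []
--     notes = []
--     if ex_start is not None:
--         k = ex_start + 1
--         if k < len(rows) and "following items" in rows[k].lower():
--             k += 1
--         while k < len(rows):
--             line = rows[k]
--             if line == "NOTES:" or line.startswith("NOTES:"):
--                 break
--             if line.upper().startswith("NOTE:"):
--                 exclusions.append(line)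
--                 k += 1
--                 continue
--             if line.strip():
--                 exclusions.append(line)
--             k += 1
--         if k < len(rows) and rows[k].startswith("NOTES:"):
--             k += 1
--             while k < len(rows):
--                 line = rows[k]
--                 if line.startswith("SELECTION ITEMS:") or line.startswith("DESIGN CLARIFICATION"):
--                     break
--                 if line.strip():
--                     notes.append(line)
--                 k += 1
--     return exclusions, notes
-- ===== SOURCE B (Python) =====
-- def extract_template_defaults(rows):
--     exclusions = []
--     notes = []
--     mode = "searching"
--     for line in rows:
--         if mode == "searching":
--             if line == "Exclusions":
--                 mode = "skip"
--             continue
--         if mode == "skip":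
--             mode = "exclusions"
--             if "following items" in line.lower():
--                 continue
--         if mode == "exclusions":
--             if line.startswith("NOTES:"):
--                 mode = "notes"
--             elif line.strip():
--                 exclusions.append(line)
--             continue
--         if mode == "notes":
--             if line.startswith("SELECTION ITEMS:") or line.startswith("DESIGN CLARIFICATION"):
--                 mode = "done"
--             elif line.strip():
--                 notes.append(line)
--     return exclusions, notes
-- ===== Notes on version B (the rewrite author's own statement) =====
-- stated objective: alternative
-- what changed: Replaced A's marker search plus two sequential index-based while-loops (with a separate optional-skip step and a redundant NOTE: branch) by one linear pass over the rows driven by a mode variable (searching/skip/exclusions/notes/done) carrying the two output lists as fold state.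
import Mathlib
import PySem

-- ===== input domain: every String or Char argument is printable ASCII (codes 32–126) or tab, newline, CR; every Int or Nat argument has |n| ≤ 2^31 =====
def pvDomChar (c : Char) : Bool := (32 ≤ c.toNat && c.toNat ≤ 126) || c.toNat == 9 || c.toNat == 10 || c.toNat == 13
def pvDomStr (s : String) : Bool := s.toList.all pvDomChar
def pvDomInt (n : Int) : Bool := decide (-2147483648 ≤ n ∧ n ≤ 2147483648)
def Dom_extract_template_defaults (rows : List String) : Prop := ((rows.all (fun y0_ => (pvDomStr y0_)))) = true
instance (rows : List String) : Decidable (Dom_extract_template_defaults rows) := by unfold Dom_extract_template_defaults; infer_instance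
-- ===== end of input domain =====

-- B replaces A's marker search plus two sequential index-based while-loops by a single
-- linear pass over the rows driven by a mode variable (objective: alternative decomposition,
-- same asymptotic cost). Return value only; neither program mutates its argument.

-- ===== PORT A =====
-- A's 'for i, t in enumerate(rows): if t == "Exclusions": ex_start = i; break' followed by
-- indexing from ex_start + 1 is ported as a structural recursion returning the suffix
-- rows[ex_start+1:] directly (the same value A's index arithmetic denotes).
def pvA_findEx : List String → Option (List String)
  | [] => none
  | t :: rest => if t == "Exclusions" then some rest else pvA_findEx rest

-- A's first while-loop over index k, ported over the suffix rows[k:]; it returns the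
-- collected exclusions together with the suffix at which the loop stopped (the break point).
def pvA_exLoop : List String → List String × List String
  | [] => ([], [])
  | line :: rest =>
    if line == "NOTES:" || PySem.Str.startswith line "NOTES:" then ([], line :: rest)
    else if PySem.Str.startswith (PySem.Str.upper line) "NOTE:" then
      let p := pvA_exLoop rest
      (line :: p.1, p.2)
    else if PySem.Str.strip line = "" then pvA_exLoop rest
    else
      let p := pvA_exLoop rest
      (line :: p.1, p.2)

-- A's second while-loop (notes), ported over the remaining suffix.
def pvA_notesLoop : List String → List String
  | [] => []
  | line :: rest =>
    if PySem.Str.startswith line "SELECTION ITEMS:" || PySem.Str.startswith line "DESIGN CLARIFICATION" then []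
    else if PySem.Str.strip line = "" then pvA_notesLoop rest
    else line :: pvA_notesLoop rest

-- 'if k < len(rows) and "following items" in rows[k].lower(): k += 1'
def pvA_skip (tail : List String) : List String :=
  match tail with
  | [] => []
  | r :: rs => if PySem.Str.isIn "following items" (PySem.Str.lower r) then rs else r :: rs

def extract_template_defaults (rows : List String) : List String × List String :=
  match pvA_findEx rows with
  | none => ([], [])
  | some tail =>
    let p := pvA_exLoop (pvA_skip tail)
    -- 'if k < len(rows) and rows[k].startswith("NOTES:"): …'
    match p.2 with
    | [] => (p.1, [])
    | r :: rs => if PySem.Str.startswith r "NOTES:" then (p.1, pvA_notesLoop rs) else (p.1, [])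

-- ===== PORT B =====
-- B's single pass: mode 0 = "searching", 1 = "skip" (the one line after the marker),
-- 2 = "exclusions", 3 = "notes", 4 = "done"; state = (mode, exclusions, notes).
-- The shared exclusions-line handler (the fall-through from "skip" into "exclusions" in Source B):
def pvB_exStep (exs nts : List String) (line : String) : Nat × List String × List String :=
  if PySem.Str.startswith line "NOTES:" then (3, exs, nts)
  else if PySem.Str.strip line = "" then (2, exs, nts)
  else (2, exs ++ [line], nts)

def pvB_step (st : Nat × List String × List String) (line : String) : Nat × List String × List String :=
  match st with
  | (m, exs, nts) =>
    if m = 0 then (if line == "Exclusions" then (1, exs, nts) else (0, exs, nts))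
    else if m = 1 then
      if PySem.Str.isIn "following items" (PySem.Str.lower line) then (2, exs, nts)
      else pvB_exStep exs nts line
    else if m = 2 then pvB_exStep exs nts line
    else if m = 3 then
      if PySem.Str.startswith line "SELECTION ITEMS:" || PySem.Str.startswith line "DESIGN CLARIFICATION" then (4, exs, nts)
      else if PySem.Str.strip line = "" then (3, exs, nts)
      else (3, exs, nts ++ [line])
    else st

def extract_template_defaults_alt (rows : List String) : List String × List String :=
  let st := rows.foldl pvB_step (0, [], [])
  (st.2.1, st.2.2)

-- ===== PRECONDITION & SPEC =====
def Spec_extract_template_defaults (rows : List String) (out : List String × List String) : Prop := out = extract_template_defaults_alt rows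
instance (rows : List String) (out : List String × List String) : Decidable (Spec_extract_template_defaults rows out) := by unfold Spec_extract_template_defaults; infer_instance

-- ===== CLAIM (what is proved, stated in full; the proofs are below) =====
def Claim_equal_extract_template_defaults : Prop := ∀ (rows : List String), Dom_extract_template_defaults rows → Spec_extract_template_defaults rows (extract_template_defaults rows)

-- ===== LEMMAS AND PROOFS =====

-- What A computes from the break point of the exclusion loop.
def pvNotesOf (rem : List String) : List String :=
  match rem with
  | [] => []
  | r :: rs => if PySem.Str.startswith r "NOTES:" then pvA_notesLoop rs else []

-- a char whose Python .upper() is 'N' ('N' or 'n') is not a space character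
theorem pv_nonspace_of_upperN (c : Char) (h : PySem.Chars.upperChar c = 'N') :
    PySem.Chars.isspace c = false := by
  unfold PySem.Chars.upperChar at h
  split at h
  · next hl =>
    unfold PySem.Chars.islower at hl
    simp only [decide_eq_true_eq, Bool.and_eq_true, Char.le_def, UInt32.le_iff_toNat_le] at hl
    have h1 : 97 ≤ c.toNat := hl.1
    have h2 : c.toNat ≤ 122 := hl.2
    simp only [PySem.Chars.isspace, Char.toNat, Bool.or_eq_false_iff, Bool.and_eq_false_iff,
      decide_eq_false_iff_not] at *
    omega
  · subst h; decide

-- a line matching A's redundant 'line.upper().startswith("NOTE:")' branch is non-blank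
theorem pv_strip_ne_of_upper_note (line : String)
    (h : PySem.Chars.startswith (PySem.Chars.upper line.toList) "NOTE:".toList = true) :
    ¬ PySem.Str.strip line = "" := by
  intro hs
  rw [PySem.Chars.startswith_iff] at h
  obtain ⟨t, ht⟩ := h
  cases hcs : line.toList with
  | nil => rw [hcs] at ht; simp [PySem.Chars.upper] at ht
  | cons c cs =>
    rw [hcs] at ht
    simp only [PySem.Chars.upper, List.map_cons] at ht
    have hcN : PySem.Chars.upperChar c = 'N' := by
      have h2 := congrArg (fun l => l.head?) ht
      simp at h2
      first
      | exact h2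
      | exact h2.symm
    have hns := pv_nonspace_of_upperN c hcN
    have hh : (PySem.Str.strip line).toList = "".toList := by rw [hs]
    rw [PySem.Str.toList_strip, hcs] at hh
    simp only [PySem.Chars.strip, PySem.Chars.lstrip, PySem.Chars.rstrip] at hh
    rw [List.dropWhile_cons_of_neg (by simp [hns])] at hh
    simp only [String.toList_empty, List.reverse_eq_nil_iff, List.dropWhile_eq_nil_iff] at hh
    have := hh c (by simp)
    simp [hns] at this

-- a line that does not start with "NOTES:" is not the string "NOTES:"
theorem pv_ne_notes (line : String)
    (hsw : PySem.Chars.startswith line.toList "NOTES:".toList = false) : ¬ line = "NOTES:" := by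
  intro h
  subst h
  exact absurd hsw (by decide)

theorem pv_fold4 (l : List String) (exs nts : List String) :
    l.foldl pvB_step (4, exs, nts) = (4, exs, nts) := by
  induction l with
  | nil => rfl
  | cons x xs ih => simp [List.foldl_cons, pvB_step, ih]

theorem pv_fold3 (l : List String) (exs nts : List String) :
    (l.foldl pvB_step (3, exs, nts)).2 = (exs, nts ++ pvA_notesLoop l) := by
  induction l generalizing nts with
  | nil => simp [pvA_notesLoop]
  | cons line rest ih =>
    by_cases hsel : (PySem.Str.startswith line "SELECTION ITEMS:" || PySem.Str.startswith line "DESIGN CLARIFICATION") = true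
    · simp at hsel
      simp [List.foldl_cons, pvB_step, hsel, pv_fold4, pvA_notesLoop]
    · simp at hsel
      by_cases hs : PySem.Str.strip line = ""
      · simp [List.foldl_cons, pvB_step, hsel, hs, ih, pvA_notesLoop]
      · simp [List.foldl_cons, pvB_step, hsel, hs, ih, pvA_notesLoop]

theorem pv_fold2 (l : List String) (exs nts : List String) :
    (l.foldl pvB_step (2, exs, nts)).2
      = (exs ++ (pvA_exLoop l).1, nts ++ pvNotesOf (pvA_exLoop l).2) := by
  induction l generalizing exs with
  | nil => simp [pvA_exLoop, pvNotesOf]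
  | cons line rest ih =>
    by_cases hsw : PySem.Chars.startswith line.toList "NOTES:".toList = true
    · simp at hsw
      simp [List.foldl_cons, pvB_step, pvB_exStep, hsw, pv_fold3, pvA_exLoop, pvNotesOf]
    · have hne := pv_ne_notes line (by simpa using hsw)
      simp at hsw
      by_cases hnote : PySem.Chars.startswith (PySem.Chars.upper line.toList) "NOTE:".toList = true
      · have hsne := pv_strip_ne_of_upper_note line hnote
        simp at hnote
        simp [List.foldl_cons, pvB_step, pvB_exStep, hsw, hne, hnote, hsne, ih, pvA_exLoop]
      · simp at hnote
        by_cases hs : PySem.Str.strip line = ""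
        · simp [List.foldl_cons, pvB_step, pvB_exStep, hsw, hne, hnote, hs, ih, pvA_exLoop]
        · simp [List.foldl_cons, pvB_step, pvB_exStep, hsw, hne, hnote, hs, ih, pvA_exLoop]

theorem pv_fold1 (l : List String) (exs nts : List String) :
    (l.foldl pvB_step (1, exs, nts)).2
      = (exs ++ (pvA_exLoop (pvA_skip l)).1, nts ++ pvNotesOf (pvA_exLoop (pvA_skip l)).2) := by
  cases l with
  | nil => simp [pvA_skip, pvA_exLoop, pvNotesOf]
  | cons r rs =>
    by_cases hf : PySem.Chars.isIn "following items".toList (PySem.Chars.lower r.toList) = true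
    · simp at hf
      simp [List.foldl_cons, pvB_step, hf, pv_fold2, pvA_skip]
    · simp at hf
      have hstep1 : pvB_step (1, exs, nts) r = pvB_exStep exs nts r := by
        simp [pvB_step, hf]
      have hstep2 : pvB_step (2, exs, nts) r = pvB_exStep exs nts r := by
        simp [pvB_step]
      rw [List.foldl_cons, hstep1, ← hstep2, ← List.foldl_cons, pv_fold2]
      simp [pvA_skip, hf]

theorem pv_main (rows : List String) :
    extract_template_defaults_alt rows = extract_template_defaults rows := by
  induction rows with
  | nil => rfl
  | cons t rest ih =>
    by_cases ht : (t == "Exclusions") = true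
    · show (List.foldl pvB_step (pvB_step (0, [], []) t) rest).2 = _
      have hstep : pvB_step (0, [], []) t = (1, [], []) := by simp [pvB_step, ht]
      rw [hstep, pv_fold1]
      simp only [extract_template_defaults, pvA_findEx, ht, if_true, List.nil_append]
      cases he : (pvA_exLoop (pvA_skip rest)).2 with
      | nil => simp [pvNotesOf]
      | cons r rs =>
        simp only [pvNotesOf]
        split_ifs <;> rfl
    · show (List.foldl pvB_step (pvB_step (0, [], []) t) rest).2 = _
      have ht' : (t == "Exclusions") = false := by simpa using ht
      have hstep : pvB_step (0, [], []) t = (0, [], []) := by simp [pvB_step, ht']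
      rw [hstep]
      have hA : extract_template_defaults (t :: rest) = extract_template_defaults rest := by
        simp [extract_template_defaults, pvA_findEx, ht']
      rw [hA, ← ih]
      rfl

-- ===== VERDICT (by name: the statement is the Claim_ definition above) =====
theorem extract_template_defaults_spec : Claim_equal_extract_template_defaults := by
  intro rows _
  unfold Spec_extract_template_defaults
  exact (pv_main rows).symm
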